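-- pv_equiv track=rewrite | github.com/liuzimo666/IBI1_2023-24 | Practical9/favourite-james-bond.py | determine_favorite_bond
-- ===== SOURCE A (Python) =====
-- def determine_favorite_bond(birth_year):
--     bond_actors = {
--         1973: 'Roger Moore',
--         1987: 'Timothy Dalton',
--         1995: 'Pierce Brosnan',
--         2006: 'Daniel Craig'
--     }
--
--     # Set the year of each actor's last film, according to the time period given in the title
--     last_bond_years = {
--         'Roger Moore': 1986,
--         'Timothy Dalton': 1994,
--         'Pierce Brosnan': 2005,
--         'Daniel Craig': 2021
--     }
--
--     # Calculate the year the individual started watching Bond movies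
--     watch_year = birth_year + 18
--
--     # Iterate through the bond_actors dictionary to find the actors corresponding to the year in which you started watching
--     for year, actor in bond_actors.items():
--         if watch_year >= year:
--             # Check to see if the year of the actor's last film is past
--             if last_bond_years[actor] >= watch_year:
--                 return actor
--             else:
--                 # If the actor's last film year has passed, find the next actor
--                 continue
--
--     # If no suitable actor is found (which in theory should not happen unless a very small year has been entered), the last actor is returned
--     return list(bond_actors.values())[-1]
-- ===== SOURCE B (Python) =====
-- def determine_favorite_bond(birth_year):
--     # Rank-based lookup: count how many era boundaries the watch year has passed,
--     # and use that count as an index into the actor list.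
--     watch_year = birth_year + 18
--     if watch_year < 1973 or watch_year > 2021:
--         return 'Daniel Craig'
--     actors = ['Roger Moore', 'Timothy Dalton', 'Pierce Brosnan', 'Daniel Craig']
--     rank = sum(watch_year >= b for b in (1987, 1995, 2006))
--     return actors[rank]
-- ===== Notes on version B (the rewrite author's own statement) =====
-- stated objective: alternative
-- what changed: Replaces A's dict iteration with nested last-film checks by a rank computation: count the era boundaries the watch year has passed and index that count into the actor list, after one clamp test for the out-of-range fallback.
import Mathlib
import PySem

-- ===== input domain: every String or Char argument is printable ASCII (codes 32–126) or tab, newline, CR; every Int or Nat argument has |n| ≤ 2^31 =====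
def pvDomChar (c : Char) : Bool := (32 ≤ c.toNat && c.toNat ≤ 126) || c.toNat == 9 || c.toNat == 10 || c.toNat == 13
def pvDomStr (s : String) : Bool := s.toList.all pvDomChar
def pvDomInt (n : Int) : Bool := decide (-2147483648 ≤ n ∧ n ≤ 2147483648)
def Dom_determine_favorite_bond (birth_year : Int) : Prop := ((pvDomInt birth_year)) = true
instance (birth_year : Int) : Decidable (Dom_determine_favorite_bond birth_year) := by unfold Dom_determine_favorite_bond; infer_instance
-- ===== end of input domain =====

-- B replaces A's dict iteration and last-film checks by a boundary-rank count indexed into the actor list (alternative formulation).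


-- ===== PORT A =====
-- A's last_bond_years dict lookup (each key is present, so the lookup is total)
def pvLastBondYear (actor : String) : Int :=
  ((PySem.Dict.ofList [("Roger Moore", (1986:Int)), ("Timothy Dalton", 1994), ("Pierce Brosnan", 2005), ("Daniel Craig", 2021)]).get? actor).getD 0

-- helper mirroring A's loop over bond_actors.items() with the inner last-film check
def pvBondLoop (watch_year : Int) : List (Int × String) → Option String
  | [] => none
  | (year, actor) :: rest =>
      if watch_year ≥ year then
        if pvLastBondYear actor ≥ watch_year then some actor
        else pvBondLoop watch_year rest
      else pvBondLoop watch_year rest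

def determine_favorite_bond (birth_year : Int) : String :=
  let bond_actors : PySem.Dict Int String :=
    PySem.Dict.ofList [(1973, "Roger Moore"), (1987, "Timothy Dalton"), (1995, "Pierce Brosnan"), (2006, "Daniel Craig")]
  let watch_year := birth_year + 18
  match pvBondLoop watch_year bond_actors.items with
  | some actor => actor
  | none => (bond_actors.values.getLast?).getD ""

-- ===== PORT B =====
def determine_favorite_bond_alt (birth_year : Int) : String :=
  let watch_year := birth_year + 18
  if watch_year < 1973 ∨ watch_year > 2021 then "Daniel Craig"
  else
    let actors := ["Roger Moore", "Timothy Dalton", "Pierce Brosnan", "Daniel Craig"]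
    let rank : Int := [(1987:Int), 1995, 2006].foldl (fun acc b => acc + (if watch_year ≥ b then 1 else 0)) 0
    (PySem.List.pyGet? actors rank).getD ""

-- ===== PRECONDITION & SPEC =====
def Spec_determine_favorite_bond (birth_year : Int) (out : String) : Prop := out = determine_favorite_bond_alt birth_year
instance (birth_year : Int) (out : String) : Decidable (Spec_determine_favorite_bond birth_year out) := by unfold Spec_determine_favorite_bond; infer_instance

-- ===== CLAIM =====
def Claim_equal_determine_favorite_bond : Prop := ∀ (birth_year : Int), Dom_determine_favorite_bond birth_year → Spec_determine_favorite_bond birth_year (determine_favorite_bond birth_year)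

-- ===== LEMMAS AND PROOFS =====

-- ===== VERDICT =====
theorem determine_favorite_bond_spec : Claim_equal_determine_favorite_bond := by
  intro y _
  unfold Spec_determine_favorite_bond
  have hit : (PySem.Dict.ofList [((1973:Int), "Roger Moore"), (1987, "Timothy Dalton"), (1995, "Pierce Brosnan"), (2006, "Daniel Craig")]).items
      = [((1973:Int), "Roger Moore"), (1987, "Timothy Dalton"), (1995, "Pierce Brosnan"), (2006, "Daniel Craig")] := by rfl
  have hv : ((PySem.Dict.ofList [((1973:Int), "Roger Moore"), (1987, "Timothy Dalton"), (1995, "Pierce Brosnan"), (2006, "Daniel Craig")]).values.getLast?).getD "" = "Daniel Craig" := by rfl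
  have h1 : pvLastBondYear "Roger Moore" = 1986 := rfl
  have h2 : pvLastBondYear "Timothy Dalton" = 1994 := rfl
  have h3 : pvLastBondYear "Pierce Brosnan" = 2005 := rfl
  have h4 : pvLastBondYear "Daniel Craig" = 2021 := rfl
  simp only [determine_favorite_bond, determine_favorite_bond_alt, hit, hv, pvBondLoop, h1, h2, h3, h4,
    List.foldl]
  split_ifs <;> first | rfl | omega
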